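-- pv_equiv track=rewrite | github.com/MarcerCyoon/TheGeniusRepository | catalog/templatetags/discordify.py | parse_underlines
-- ===== SOURCE A (Python) =====
-- def parse_underlines(value):
-- 	lst = value.split("__")
--
-- 	if len(lst) > 2:
-- 		string = ""
-- 		for i in range(0, len(lst)):
-- 			string += lst[i]
--
-- 			if i != len(lst) - 1:
-- 				if i % 2 == 0:
-- 					string += "<u>"
-- 				else:
-- 					string += "</u>"
--
-- 		return string
-- 	else:
-- 		return "__".join(lst)
-- ===== SOURCE B (Python) =====
-- def parse_underlines(value):
--     # Fewer than two double-underscore delimiters: nothing to pair up, return unchanged.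
--     if value.count("__") < 2:
--         return value
--     out = []
--     i = 0
--     open_tag = True
--     n = len(value)
--     while i < n:
--         if value.startswith("__", i):
--             out.append("<u>" if open_tag else "</u>")
--             open_tag = not open_tag
--             i += 2
--         else:
--             out.append(value[i])
--             i += 1
--     return "".join(out)
-- ===== Notes on version B (the rewrite author's own statement) =====
-- stated objective: alternative
-- what changed: Replaces split-on-the-double-underscore-delimiter into a parts list rebuilt by an index-parity loop with a single left-to-right character scan that emits a toggling <u>/</u> tag at each delimiter occurrence, guarded by a delimiter count.
import Mathlib
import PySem

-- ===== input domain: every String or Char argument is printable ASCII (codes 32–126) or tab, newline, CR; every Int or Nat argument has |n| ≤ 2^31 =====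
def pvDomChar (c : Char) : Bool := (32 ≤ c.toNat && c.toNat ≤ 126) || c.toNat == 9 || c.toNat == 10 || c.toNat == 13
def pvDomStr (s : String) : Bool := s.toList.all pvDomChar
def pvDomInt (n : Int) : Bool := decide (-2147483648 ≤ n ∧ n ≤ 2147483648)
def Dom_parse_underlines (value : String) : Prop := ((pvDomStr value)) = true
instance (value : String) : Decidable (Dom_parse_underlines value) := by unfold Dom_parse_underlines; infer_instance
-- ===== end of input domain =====

-- B replaces A's split-into-parts-and-rejoin-by-index-parity with a single character
-- scan that emits a toggling <u>/</u> tag at each "__" occurrence (alternative, same cost).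

-- ===== PORT A =====
-- A's for-loop over range(len(lst)) with the growing `string` accumulator;
-- `total` is len(lst), `i` the loop index, `string` the accumulator.
def paGo (total : Nat) : List (List Char) → Nat → List Char → List Char
  | [], _, string => string
  | p :: rest, i, string =>
      let string := string ++ p
      let string :=
        if i ≠ total - 1 then
          (if i % 2 == 0 then string ++ ['<', 'u', '>'] else string ++ ['<', '/', 'u', '>'])
        else string
      paGo total rest (i + 1) string

def parse_underlines (value : String) : String :=
  let lst := PySem.Chars.splitOn value.toList ['_', '_']
  if lst.length > 2 then
    String.ofList (paGo lst.length lst 0 [])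
  else
    String.ofList (PySem.Chars.join ['_', '_'] lst)

-- ===== PORT B =====
-- Source B's while-loop scan: at each position, either consume "__" and emit a toggling
-- tag, or copy one character.
def pbGo (l : List Char) (openTag : Bool) : List Char :=
  match l with
  | [] => []
  | c :: rest =>
      if ['_', '_'].isPrefixOf (c :: rest) then
        (if openTag then ['<', 'u', '>'] else ['<', '/', 'u', '>']) ++ pbGo (rest.drop 1) (!openTag)
      else
        c :: pbGo rest openTag
termination_by l.length
decreasing_by all_goals (simp; try omega)

def parse_underlines_alt (value : String) : String :=
  if PySem.Str.count value "__" < 2 then value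
  else String.ofList (pbGo value.toList true)

-- ===== PRECONDITION & SPEC =====
def Spec_parse_underlines (value : String) (out : String) : Prop := out = parse_underlines_alt value
instance (value : String) (out : String) : Decidable (Spec_parse_underlines value out) := by unfold Spec_parse_underlines; infer_instance

-- ===== CLAIM (what is proved, stated in full; the proofs are below) =====
def Claim_equal_parse_underlines : Prop := ∀ (value : String), Dom_parse_underlines value → Spec_parse_underlines value (parse_underlines value)

-- ===== LEMMAS AND PROOFS =====

-- Clean (fuel-free) splitting on "__", used to characterise both ports.
def mySplit (l cur : List Char) : List (List Char) :=
  match l with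
  | [] => [cur.reverse]
  | c :: rest =>
      if ['_', '_'].isPrefixOf (c :: rest) then
        cur.reverse :: mySplit (rest.drop 1) []
      else
        mySplit rest (c :: cur)
termination_by l.length
decreasing_by all_goals (simp; try omega)

-- Clean count of non-overlapping "__" occurrences.
def myCount (l : List Char) : Nat :=
  match l with
  | [] => 0
  | c :: rest =>
      if ['_', '_'].isPrefixOf (c :: rest) then
        myCount (rest.drop 1) + 1
      else
        myCount rest
termination_by l.length
decreasing_by all_goals (simp; try omega)

-- PySem's fuelled splitOn.go agrees with mySplit when fuel exceeds the length.
theorem splitOn_go_eq_mySplit :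
    ∀ (fuel : Nat) (l cur : List Char) (acc : List (List Char)),
      l.length < fuel →
      PySem.Chars.splitOn.go ['_', '_'] fuel l cur acc = acc.reverse ++ mySplit l cur := by
  intro fuel
  induction fuel with
  | zero => intro l cur acc h; omega
  | succ n ih =>
      intro l cur acc h
      match l with
      | [] => simp [PySem.Chars.splitOn.go, mySplit]
      | c :: rest =>
          by_cases hp : ['_', '_'].isPrefixOf (c :: rest) = true
          · have hdrop : List.drop (List.length ([] : List Char) + 1 + 1) (c :: rest) = rest.drop 1 := by simp
            have hlen : (rest.drop 1).length < n := by
              simp at h ⊢; omega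
            simp only [PySem.Chars.splitOn.go, hp, if_pos, List.length_cons]
            rw [hdrop, ih _ _ _ hlen]
            simp [mySplit, hp]
          · have hlen : rest.length < n := by simp at h; omega
            simp only [PySem.Chars.splitOn.go, hp]
            rw [if_neg (by simp [hp]), ih _ _ _ hlen]
            simp [mySplit, hp]

theorem splitOn_eq_mySplit (s : List Char) :
    PySem.Chars.splitOn s ['_', '_'] = mySplit s [] := by
  unfold PySem.Chars.splitOn
  rw [splitOn_go_eq_mySplit (s.length + 1) s [] [] (by omega)]
  simp

-- PySem's fuelled count.go agrees with myCount when fuel covers the length.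
theorem count_go_eq_myCount :
    ∀ (fuel : Nat) (l : List Char) (acc : Nat),
      l.length ≤ fuel →
      PySem.Chars.count.go ['_', '_'] fuel l acc = acc + myCount l := by
  intro fuel
  induction fuel with
  | zero =>
      intro l acc h
      have : l = [] := by
        cases l with
        | nil => rfl
        | cons c r => simp at h
      subst this
      simp [PySem.Chars.count.go, myCount]
  | succ n ih =>
      intro l acc h
      match l with
      | [] => simp [PySem.Chars.count.go, myCount]
      | c :: rest =>
          by_cases hp : ['_', '_'].isPrefixOf (c :: rest) = true
          · have hdrop : List.drop (List.length ([] : List Char) + 1 + 1) (c :: rest) = rest.drop 1 := by simp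
            have hlen : (rest.drop 1).length ≤ n := by simp at h ⊢; omega
            simp only [PySem.Chars.count.go, hp, if_pos, List.length_cons]
            rw [hdrop, ih _ _ hlen]
            simp [myCount, hp]; omega
          · have hlen : rest.length ≤ n := by simp at h; omega
            simp only [PySem.Chars.count.go, hp]
            rw [if_neg (by simp [hp]), ih _ _ hlen]
            simp [myCount, hp]

theorem count_eq_myCount (s : List Char) :
    PySem.Chars.count s ['_', '_'] = myCount s := by
  unfold PySem.Chars.count
  rw [if_neg (by simp)]
  simpa using count_go_eq_myCount s.length s 0 (le_refl _)

-- mySplit is never empty.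
theorem mySplit_ne_nil (l cur : List Char) : mySplit l cur ≠ [] := by
  induction l, cur using mySplit.induct with
  | case1 cur => simp [mySplit]
  | case2 cur c rest hp ih => simp [mySplit, hp]
  | case3 cur c rest hp ih => simpa [mySplit, hp] using ih

-- The number of parts is the delimiter count plus one.
theorem length_mySplit (l cur : List Char) : (mySplit l cur).length = myCount l + 1 := by
  induction l, cur using mySplit.induct with
  | case1 cur => simp [mySplit, myCount]
  | case2 cur c rest hp ih => simp [mySplit, myCount, hp, List.drop_one ▸ ih]
  | case3 cur c rest hp ih => simp [mySplit, myCount, hp, ih]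

-- Rejoining the split with the separator restores the input.
theorem join_mySplit (l cur : List Char) :
    PySem.Chars.join ['_', '_'] (mySplit l cur) = cur.reverse ++ l := by
  induction l, cur using mySplit.induct with
  | case1 cur => simp [mySplit, PySem.Chars.join_singleton]
  | case2 cur c rest hp ih =>
      obtain ⟨q, qs, hq⟩ : ∃ q qs, mySplit (rest.drop 1) [] = q :: qs := by
        cases hmm : mySplit (rest.drop 1) [] with
        | nil => exact absurd hmm (mySplit_ne_nil _ _)
        | cons q qs => exact ⟨q, qs, rfl⟩
      have hcr : c :: rest = '_' :: '_' :: rest.drop 1 := by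
        rcases (List.isPrefixOf_iff_prefix.mp hp) with ⟨t, ht⟩
        cases rest with
        | nil => simp at ht
        | cons d r =>
            simp at ht
            obtain ⟨h1, h2, h3⟩ := ht
            simp [← h1, ← h2]
      rw [mySplit]
      simp only [hp, if_pos, hq, PySem.Chars.join_cons_cons]
      rw [← hq, ih]
      simp [hcr]
  | case3 cur c rest hp ih =>
      rw [mySplit]
      simp only [hp, if_neg, Bool.not_eq_true]
      rw [ih]
      simp

-- Clean form of A's loop: append-recursion without the accumulator.
def paClean (i : Nat) : List (List Char) → List Char
  | [] => []
  | [p] => p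
  | p :: q :: rest =>
      p ++ (if i % 2 == 0 then ['<', 'u', '>'] else ['<', '/', 'u', '>']) ++
        paClean (i + 1) (q :: rest)

theorem paGo_eq_paClean :
    ∀ (parts : List (List Char)) (i : Nat) (string : List Char) (total : Nat),
      i + parts.length = total →
      paGo total parts i string = string ++ paClean i parts := by
  intro parts
  induction parts with
  | nil => intro i string total h; simp [paGo, paClean]
  | cons p rest ih =>
      intro i string total h
      cases rest with
      | nil =>
          have hi : i = total - 1 := by simp at h; omega
          simp [paGo, paClean, hi]
      | cons q qs =>
          have hne : i ≠ total - 1 := by simp at h; omega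
          have hrec : (i + 1) + (q :: qs).length = total := by simp at h ⊢; omega
          rw [paGo]
          simp only [if_pos hne]
          by_cases hpar : i % 2 == 0
          · simp only [hpar, if_pos]
            rw [ih _ _ _ hrec, paClean]
            simp [hpar]
          · simp only [hpar]
            rw [if_neg (by simpa using hpar), ih _ _ _ hrec, paClean]
            simp at hpar
            simp [hpar]

-- The parity-indexed rejoin of the split equals B's toggling scan.
theorem paClean_mySplit_eq_pbGo :
    ∀ (l cur : List Char) (i : Nat),
      paClean i (mySplit l cur) = cur.reverse ++ pbGo l (i % 2 == 0) := by
  intro l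
  induction l, ([] : List Char) using mySplit.induct with
  | case1 _ =>
      intro cur i
      simp [mySplit, paClean, pbGo]
  | case2 _cur c rest hp ih =>
      intro cur i
      obtain ⟨q, qs, hq⟩ : ∃ q qs, mySplit (rest.drop 1) [] = q :: qs := by
        cases hmm : mySplit (rest.drop 1) [] with
        | nil => exact absurd hmm (mySplit_ne_nil _ _)
        | cons q qs => exact ⟨q, qs, rfl⟩
      rw [mySplit]
      simp only [hp, if_pos, hq, paClean]
      rw [← hq, ih [] (i + 1)]
      rw [pbGo]
      simp only [hp, if_pos]
      have hpar : ((i + 1) % 2 == 0) = !(i % 2 == 0) := by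
        rcases Nat.mod_two_eq_zero_or_one i with hm | hm <;>
          simp [Nat.add_mod, hm]
      rw [hpar]
      by_cases hb : (i % 2 == 0) = true <;> simp [hb]
  | case3 _cur c rest hp ih =>
      intro cur i
      rw [mySplit]
      simp only [hp, if_neg, Bool.not_eq_true]
      rw [ih (c :: cur) i, pbGo]
      simp [hp]

-- ===== VERDICT (by name: the statement is the Claim_ definition above) =====
theorem parse_underlines_spec : Claim_equal_parse_underlines := by
  intro value _
  unfold Spec_parse_underlines parse_underlines parse_underlines_alt
  rw [PySem.Str.count_eq]
  have hc : PySem.Chars.count value.toList "__".toList = myCount value.toList := by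
    have : "__".toList = ['_', '_'] := by decide
    rw [this, count_eq_myCount]
  rw [hc, splitOn_eq_mySplit]
  show (if (mySplit value.toList []).length > 2 then
          String.ofList (paGo (mySplit value.toList []).length (mySplit value.toList []) 0 [])
        else String.ofList (PySem.Chars.join ['_', '_'] (mySplit value.toList []))) = _
  rw [length_mySplit]
  by_cases h2 : myCount value.toList < 2
  · rw [if_neg (by omega), if_pos h2, join_mySplit]
    simp
  · rw [if_pos (by omega), if_neg h2]
    rw [paGo_eq_paClean _ 0 [] _ (by simp [length_mySplit])]
    rw [paClean_mySplit_eq_pbGo]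
    simp
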